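-- pv_equiv track=rewrite | github.com/fstetler/Python-course | Code_Wars.py | highest_rank
-- ===== SOURCE A (Python) =====
-- def highest_rank(arr):
-- 	maxCount = []
-- 	maxList = []
-- 	for i in arr:
-- 		maxCount.append(arr.count(i))
-- 	for j in arr:
-- 		if arr.count(j) == max(maxCount):
-- 			maxList.append(j)
-- 	maxList.sort()
-- 	return maxList[-1]
-- ===== SOURCE B (Python) =====
-- def highest_rank(arr):
--     counts = {}
--     for x in arr:
--         counts[x] = counts.get(x, 0) + 1
--     return max(counts.items(), key=lambda kv: (kv[1], kv[0]))[0]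
-- ===== Notes on version B (the rewrite author's own statement) =====
-- stated objective: faster
-- what changed: Replaces the per-element arr.count scans, filter pass and sort with a single counting-dict pass followed by one argmax over the distinct (value, count) items keyed lexicographically by (count, value).
import Mathlib
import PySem

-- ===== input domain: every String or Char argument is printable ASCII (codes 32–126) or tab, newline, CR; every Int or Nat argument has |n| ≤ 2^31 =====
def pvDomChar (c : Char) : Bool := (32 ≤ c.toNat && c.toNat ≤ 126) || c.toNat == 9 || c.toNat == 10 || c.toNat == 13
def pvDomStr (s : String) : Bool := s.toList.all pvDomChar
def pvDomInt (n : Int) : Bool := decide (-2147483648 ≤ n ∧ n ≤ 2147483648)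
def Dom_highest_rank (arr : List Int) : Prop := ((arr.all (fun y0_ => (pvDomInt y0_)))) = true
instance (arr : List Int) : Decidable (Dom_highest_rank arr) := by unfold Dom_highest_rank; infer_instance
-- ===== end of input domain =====

-- B replaces A's quadratic per-element count scans, filter pass and sort by one counting-dict
-- pass and a single lexicographic (count, value) argmax over the distinct items: faster.

-- ===== PORT A =====
def highest_rank (arr : List Int) : Int :=
  let maxCount : List Int := arr.foldl (fun acc i => acc ++ [(arr.count i : Int)]) []
  let maxList : List Int := arr.foldl (fun acc j =>
    if some ((arr.count j : Int)) = PySem.List.max? maxCount (fun x => x) then acc ++ [j]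
    else acc) []
  let sortedList := PySem.List.sorted maxList (fun x => x) false
  (PySem.List.pyGet? sortedList (-1)).getD 0   -- maxList[-1]; none (IndexError) only for arr = [], excluded by Pre_

-- ===== PORT B =====
def highest_rank_alt (arr : List Int) : Int :=
  let counts : PySem.Dict Int Int := arr.foldl (fun d x => d.insert x (d.getD x 0 + 1)) PySem.Dict.empty
  match PySem.List.max2? counts.items (fun kv => kv.2) (fun kv => kv.1) with
  | some kv => kv.1
  | none => 0   -- Python max raises ValueError here; only for arr = [], excluded by Pre_

-- ===== PRECONDITION & SPEC =====
-- Pre_ excludes only the empty list, on which A raises IndexError (and B raises ValueError).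
def Pre_highest_rank (arr : List Int) : Prop := arr ≠ []
instance (arr : List Int) : Decidable (Pre_highest_rank arr) := by unfold Pre_highest_rank; infer_instance
def pvWitness_highest_rank : List Int := [1, 2, 2]
def Spec_highest_rank (arr : List Int) (out : Int) : Prop := out = highest_rank_alt arr
instance (arr : List Int) (out : Int) : Decidable (Spec_highest_rank arr out) := by unfold Spec_highest_rank; infer_instance

-- ===== CLAIM (what is proved, stated in full; the proofs are below) =====
def Claim_equal_highest_rank : Prop := ∀ (arr : List Int), Dom_highest_rank arr → Pre_highest_rank arr → Spec_highest_rank arr (highest_rank arr)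

-- ===== LEMMAS AND PROOFS =====

-- "m is the largest value among the most frequent elements of arr":
-- m ∈ arr and every x ∈ arr is lexicographically ≤ m under the key (count, value).
def pvBest (arr : List Int) (m : Int) : Prop :=
  m ∈ arr ∧ ∀ x ∈ arr,
    (arr.count x : Int) < (arr.count m : Int) ∨
    ((arr.count x : Int) = (arr.count m : Int) ∧ x ≤ m)

theorem pvBest_unique (arr : List Int) (m m' : Int)
    (h : pvBest arr m) (h' : pvBest arr m') : m = m' := by
  obtain ⟨hm, hall⟩ := h
  obtain ⟨hm', hall'⟩ := h'
  rcases hall m' hm' with h1 | h1 <;> rcases hall' m hm with h2 | h2 <;> omega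

-- last element of a (· ≤ ·)-pairwise list bounds every element
theorem pvLast_max (l : List Int) (hp : l.Pairwise (· ≤ ·)) (m : Int)
    (hm : l.getLast? = some m) : ∀ x ∈ l, x ≤ m := by
  intro x hx
  rw [List.getLast?_eq_getElem?] at hm
  obtain ⟨i, hi, rfl⟩ := List.mem_iff_getElem.mp hx
  have hlen : 0 < l.length := by omega
  have hm' : l[l.length - 1]? = some m := hm
  rw [List.getElem?_eq_getElem (by omega)] at hm'
  have hml : l[l.length - 1] = m := by exact Option.some.inj hm'
  rcases Nat.lt_or_ge i (l.length - 1) with hlt | hge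
  · have := (List.pairwise_iff_getElem.mp hp) i (l.length - 1) hi (by omega) hlt
    omega
  · have : i = l.length - 1 := by omega
    subst this; omega

theorem pvA_best (arr : List Int) (h : arr ≠ []) : pvBest arr (highest_rank arr) := by
  unfold highest_rank
  rw [PySem.List.foldl_append_singleton_eq_map (fun i => ((arr.count i : Int))) arr []]
  simp only [List.nil_append]
  -- the max of the count list
  obtain ⟨M, hM⟩ : ∃ M, PySem.List.max? (arr.map (fun i => ((arr.count i : Int)))) (fun x => x) = some M := by
    cases hmx : PySem.List.max? (arr.map (fun i => ((arr.count i : Int)))) (fun x => x) with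
    | none => exact absurd (by simpa using (PySem.List.max?_eq_none_iff _ _).mp hmx) h
    | some M => exact ⟨M, rfl⟩
  simp only [hM]
  rw [PySem.List.foldl_append_ite_eq_filter (fun j => some ((arr.count j : Int)) = some M) arr []]
  simp only [List.nil_append]
  set maxList := arr.filter (fun j => decide (some ((arr.count j : Int)) = some M)) with hmaxList
  have hMmem : M ∈ arr.map (fun i => ((arr.count i : Int))) := PySem.List.max?_mem hM
  obtain ⟨k, hk, hkM⟩ := List.mem_map.mp hMmem
  have hkfil : k ∈ maxList := by
    rw [hmaxList, List.mem_filter]; exact ⟨hk, by simp [hkM]⟩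
  have hne : maxList ≠ [] := fun hnil => by simp [hnil] at hkfil
  set s := PySem.List.sorted maxList (fun x => x) false with hs
  have hsne : s ≠ [] := fun hnil => hne ((PySem.List.sorted_eq_nil_iff _ _ _).mp hnil)
  -- last element of the sorted list
  obtain ⟨m, hmlast⟩ : ∃ m, s.getLast? = some m := by
    cases hgl : s.getLast? with
    | none => exact absurd (List.getLast?_eq_none_iff.mp hgl) hsne
    | some m => exact ⟨m, rfl⟩
  have hget : PySem.List.pyGet? s (-1) = some m := by
    have h1 : (1 : Nat) ≤ s.length := List.length_pos_iff.mpr hsne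
    have := PySem.List.pyGet?_neg_ofNat s 1 (by omega) h1
    rw [this, ← List.getLast?_eq_getElem?, hmlast]
  rw [hget]
  simp only [Option.getD_some]
  -- m is in arr and has count M
  have hmmem : m ∈ s := by
    rw [List.getLast?_eq_getElem?] at hmlast
    exact List.mem_of_getElem? hmlast
  have hmfil : m ∈ maxList := (PySem.List.mem_sorted _ _ _ _).mp hmmem
  have hmarr : m ∈ arr := (List.mem_filter.mp hmfil).1
  have hmcnt : (arr.count m : Int) = M := by
    have := (List.mem_filter.mp hmfil).2
    simpa using this
  refine ⟨hmarr, fun x hx => ?_⟩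
  have hle : (arr.count x : Int) ≤ M :=
    PySem.List.max?_isMax hM _ (List.mem_map.mpr ⟨x, hx, rfl⟩)
  rcases eq_or_lt_of_le hle with heq | hlt
  · right
    refine ⟨by omega, ?_⟩
    have hxfil : x ∈ maxList := by
      rw [hmaxList, List.mem_filter]; exact ⟨hx, by simp [heq]⟩
    have hxs : x ∈ s := (PySem.List.mem_sorted _ _ _ _).mpr hxfil
    exact pvLast_max s (PySem.List.sorted_pairwise maxList (fun x => x)) m hmlast x hxs
  · left; omega

-- the max2? fold with a running best: result is in the list (or the seed) and lex-dominates everything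
-- the fold step of max2? with keys (·.2), (·.1)
def pvStep (acc : Option (Int × Int)) (x : Int × Int) : Option (Int × Int) :=
  match acc with
  | none => some x
  | some b => if (decide (b.2 < x.2) || !decide (x.2 < b.2) && decide (b.1 < x.1)) = true
              then some x else some b

theorem pvMax2_eq_foldl (l : List (Int × Int)) :
    PySem.List.max2? l (fun kv => kv.2) (fun kv => kv.1) = l.foldl pvStep none := by
  unfold PySem.List.max2?
  congr 1
  funext acc x
  cases acc <;> rfl

theorem pvMax2_foldl (l : List (Int × Int)) (a : Int × Int) :
    ∃ m, l.foldl pvStep (some a) = some m ∧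
      (m = a ∨ m ∈ l) ∧ (a.2 < m.2 ∨ (a.2 = m.2 ∧ a.1 ≤ m.1)) ∧
      ∀ y ∈ l, y.2 < m.2 ∨ (y.2 = m.2 ∧ y.1 ≤ m.1) := by
  induction l generalizing a with
  | nil => exact ⟨a, rfl, Or.inl rfl, Or.inr ⟨rfl, le_refl _⟩, by simp⟩
  | cons x t ih =>
    simp only [List.foldl_cons, pvStep]
    by_cases hc : (decide (a.2 < x.2) || !decide (x.2 < a.2) && decide (a.1 < x.1)) = true
    · rw [if_pos hc]
      obtain ⟨m, hfold, hmem, hax, hall⟩ := ih x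
      refine ⟨m, hfold, ?_, ?_, ?_⟩
      · rcases hmem with rfl | hm
        · exact Or.inr (List.mem_cons_self ..)
        · exact Or.inr (List.mem_cons_of_mem _ hm)
      · simp only [Bool.or_eq_true, Bool.and_eq_true, Bool.not_eq_true', decide_eq_true_eq,
          decide_eq_false_iff_not] at hc
        rcases hc with h1 | ⟨h1, h2⟩ <;> omega
      · intro y hy
        rcases List.mem_cons.mp hy with rfl | hyt
        · exact hax
        · exact hall y hyt
    · rw [if_neg hc]
      obtain ⟨m, hfold, hmem, hax, hall⟩ := ih a
      refine ⟨m, hfold, ?_, hax, ?_⟩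
      · rcases hmem with rfl | hm
        · exact Or.inl rfl
        · exact Or.inr (List.mem_cons_of_mem _ hm)
      · intro y hy
        rcases List.mem_cons.mp hy with rfl | hyt
        · simp only [Bool.or_eq_true, Bool.and_eq_true, Bool.not_eq_true', decide_eq_true_eq,
            decide_eq_false_iff_not] at hc
          push Not at hc
          rcases hax with h1 | ⟨h1, h2⟩ <;> omega
        · exact hall y hyt

theorem pvB_best (arr : List Int) (h : arr ≠ []) : pvBest arr (highest_rank_alt arr) := by
  unfold highest_rank_alt
  rw [PySem.Dict.foldl_insert_getD_add_one_eq_counter arr]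
  have hitems : (PySem.Dict.counter arr).items
      = List.map (fun k => (k, ((List.count k arr : Nat) : Int))) (PySem.Set.ofList arr) :=
    PySem.Dict.items_counter arr
  -- the items list is nonempty
  obtain ⟨p, rest, hcons⟩ : ∃ p rest, (PySem.Dict.counter arr).items = p :: rest := by
    rw [hitems]
    cases harr : PySem.Set.ofList arr with
    | nil =>
      exfalso
      cases arr with
      | nil => exact h rfl
      | cons a t =>
        have : a ∈ PySem.Set.ofList (a :: t) := (PySem.Set.mem_ofList _ _).mpr (List.mem_cons_self ..)
        rw [harr] at this; simp at this
    | cons q qs => exact ⟨_, _, rfl⟩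
  show pvBest arr (match PySem.List.max2? (PySem.Dict.counter arr).items (fun kv => kv.2) (fun kv => kv.1) with | some kv => kv.1 | none => 0)
  rw [hcons]
  obtain ⟨m, hfold, hmem, hpm, hall⟩ := pvMax2_foldl rest p
  have hmax2 : PySem.List.max2? (p :: rest) (fun kv => kv.2) (fun kv => kv.1) = some m := by
    rw [pvMax2_eq_foldl, List.foldl_cons]
    exact hfold
  rw [hmax2]
  -- m is an item (k, count k) with k ∈ arr
  have hmitems : m ∈ (PySem.Dict.counter arr).items := by
    rw [hcons]
    rcases hmem with rfl | hm
    · exact List.mem_cons_self ..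
    · exact List.mem_cons_of_mem _ hm
  rw [hitems] at hmitems
  obtain ⟨k, hk, hkm⟩ := List.mem_map.mp hmitems
  subst hkm
  have hkarr : k ∈ arr := (PySem.Set.mem_ofList _ _).mp hk
  show pvBest arr k
  refine ⟨hkarr, ?_⟩
  intro x hx
  have hxitem : ((x, ((List.count x arr : Nat) : Int))) ∈ (PySem.Dict.counter arr).items := by
    rw [hitems]
    exact List.mem_map.mpr ⟨x, (PySem.Set.mem_ofList _ _).mpr hx, rfl⟩
  rw [hcons] at hxitem
  rcases List.mem_cons.mp hxitem with heq | hxt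
  · have hp := hpm
    rw [← heq] at hp
    simpa using hp
  · have hy := hall _ hxt
    simpa using hy

-- ===== VERDICT (by name: the statement is the Claim_ definition above) =====
theorem highest_rank_spec : Claim_equal_highest_rank := by
  intro arr _ hpre
  unfold Spec_highest_rank
  exact pvBest_unique arr _ _ (pvA_best arr hpre) (pvB_best arr hpre)
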